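-- pv_equiv track=rewrite | github.com/HenziKou/CIS-210 | Guide/alphacode.py | alphapinEncode
-- ===== SOURCE A (Python) =====
-- def alphapinEncode (pin):
--     """
-- int -> str
-- given a pin number, returns an easily pronouncable
-- word.
-- returns word
-- >>> alphapinEncode(4327)
-- 'lohi'
--
-- """
--     vowels = 'aeiou'
--     consonants = 'bcdfghjklmnpqrstvwyz'
--     word = ''
--     while pin > 0:
--         lastTwo = pin % 100
--         #print (lastTwo)
--         pin = pin // 100
--
--         word = (vowels [lastTwo % 5]) + word
--         word = (consonants [lastTwo // 5]) + word
--
--     return word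
-- ===== SOURCE B (Python) =====
-- def alphapinEncode(pin):
--     if pin <= 0:
--         return ''
--     vowels = 'aeiou'
--     consonants = 'bcdfghjklmnpqrstvwyz'
--     lastTwo = pin % 100
--     return alphapinEncode(pin // 100) + consonants[lastTwo // 5] + vowels[lastTwo % 5]
-- ===== Notes on version B (the rewrite author's own statement) =====
-- stated objective: alternative
-- what changed: Replaced the while-loop that prepends each pair's consonant+vowel from the least-significant end by a recursion that consumes the most-significant pairs first via the recursive call and appends the current pair's letters, building the word front-to-back.
import Mathlib
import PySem

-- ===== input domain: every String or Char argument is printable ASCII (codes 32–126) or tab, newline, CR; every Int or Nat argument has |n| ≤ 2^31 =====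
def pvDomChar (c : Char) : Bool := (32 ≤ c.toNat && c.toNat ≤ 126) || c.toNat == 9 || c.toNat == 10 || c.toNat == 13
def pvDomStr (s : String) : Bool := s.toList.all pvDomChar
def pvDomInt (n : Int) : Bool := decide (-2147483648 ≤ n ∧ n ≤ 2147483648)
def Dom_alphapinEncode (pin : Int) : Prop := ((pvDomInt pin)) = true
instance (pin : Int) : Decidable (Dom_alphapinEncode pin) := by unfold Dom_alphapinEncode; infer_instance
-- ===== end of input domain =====

-- ===== PORT A =====
-- B differs from A by decomposition: A's while-loop prepends letters from the
-- least-significant pair; B recurses on pin // 100 and appends the current pair's letters.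
def pvVowels : List Char := ['a','e','i','o','u']
def pvConsonants : List Char := ['b','c','d','f','g','h','j','k','l','m','n','p','q','r','s','t','v','w','y','z']

-- while pin > 0: prepend vowel then consonant of the last two digits (indices always in range)
def alphapinLoopA (pin : Int) (word : List Char) : List Char :=
  if h : pin > 0 then
    let lastTwo := PySem.Int.mod pin 100
    let pin' := PySem.Int.floordiv pin 100
    let word1 := ((PySem.List.pyGet? pvVowels (PySem.Int.mod lastTwo 5)).getD ' ') :: word
    let word2 := ((PySem.List.pyGet? pvConsonants (PySem.Int.floordiv lastTwo 5)).getD ' ') :: word1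
    alphapinLoopA pin' word2
  else word
termination_by pin.toNat
decreasing_by
  have h2 : PySem.Int.floordiv pin 100 = pin / 100 := PySem.Int.floordiv_eq_ediv_of_pos (by omega)
  rw [h2]; omega

def alphapinEncode (pin : Int) : String := String.mk (alphapinLoopA pin [])

-- ===== PORT B =====
def alphapinRecB (pin : Int) : List Char :=
  if h : pin ≤ 0 then []
  else
    let lastTwo := PySem.Int.mod pin 100
    alphapinRecB (PySem.Int.floordiv pin 100) ++
      [((PySem.List.pyGet? pvConsonants (PySem.Int.floordiv lastTwo 5)).getD ' '),
       ((PySem.List.pyGet? pvVowels (PySem.Int.mod lastTwo 5)).getD ' ')]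
termination_by pin.toNat
decreasing_by
  have hp : 0 < pin := by omega
  have h2 : PySem.Int.floordiv pin 100 = pin / 100 := PySem.Int.floordiv_eq_ediv_of_pos (by omega)
  rw [h2]; omega

def alphapinEncode_alt (pin : Int) : String := String.mk (alphapinRecB pin)

-- ===== PRECONDITION & SPEC =====
def Spec_alphapinEncode (pin : Int) (out : String) : Prop := out = alphapinEncode_alt pin
instance (pin : Int) (out : String) : Decidable (Spec_alphapinEncode pin out) := by unfold Spec_alphapinEncode; infer_instance

-- ===== CLAIM (what is proved, stated in full; the proofs are below) =====
def Claim_equal_alphapinEncode : Prop := ∀ (pin : Int), Dom_alphapinEncode pin → Spec_alphapinEncode pin (alphapinEncode pin)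

-- ===== LEMMAS AND PROOFS =====
theorem alphapinLoopA_eq_recB (pin : Int) (word : List Char) :
    alphapinLoopA pin word = alphapinRecB pin ++ word := by
  induction pin, word using alphapinLoopA.induct with
  | case1 pin word h lastTwo pin' word1 word2 ih =>
    rw [alphapinLoopA, alphapinRecB]
    simp only [h, dite_eq_ite, if_neg (by omega : ¬ pin ≤ 0)]
    rw [ih]
    simp [word2, word1, lastTwo, pin']
  | case2 pin word h =>
    rw [alphapinLoopA, alphapinRecB]
    simp [h, if_pos (by omega : pin ≤ 0)]

-- ===== VERDICT (by name: the statement is the Claim_ definition above) =====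
theorem alphapinEncode_spec : Claim_equal_alphapinEncode := by
  intro pin _
  unfold Spec_alphapinEncode alphapinEncode alphapinEncode_alt
  rw [alphapinLoopA_eq_recB, List.append_nil]
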